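-- pv_equiv track=rewrite | github.com/IncognitoPeter/informatyka_korki | moduł_4_tablice/zestaw_1/zadania_2D.py | suma_w
-- ===== SOURCE A (Python) =====
-- def suma_w(w1, w2):
--     n = max(len(w1), len(w2))
--     wynik = [0] * n
--     for i in range(n):
--         if i < len(w1):
--             wynik[i] += w1[i]
--         if i < len(w2):
--             wynik[i] += w2[i]
--     return wynik
-- ===== SOURCE B (Python) =====
-- def suma_w(w1, w2):
--     m = min(len(w1), len(w2))
--     res = [a + b for a, b in zip(w1, w2)]
--     res += w1[m:] if len(w1) > len(w2) else w2[m:]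
--     return res
-- ===== Notes on version B (the rewrite author's own statement) =====
-- stated objective: idiomatic
-- what changed: Replaces the uniform padded loop with per-index bounds checks over a preallocated zero list by an element-wise zip over the common prefix followed by appending the longer vector's tail.
import Mathlib
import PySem

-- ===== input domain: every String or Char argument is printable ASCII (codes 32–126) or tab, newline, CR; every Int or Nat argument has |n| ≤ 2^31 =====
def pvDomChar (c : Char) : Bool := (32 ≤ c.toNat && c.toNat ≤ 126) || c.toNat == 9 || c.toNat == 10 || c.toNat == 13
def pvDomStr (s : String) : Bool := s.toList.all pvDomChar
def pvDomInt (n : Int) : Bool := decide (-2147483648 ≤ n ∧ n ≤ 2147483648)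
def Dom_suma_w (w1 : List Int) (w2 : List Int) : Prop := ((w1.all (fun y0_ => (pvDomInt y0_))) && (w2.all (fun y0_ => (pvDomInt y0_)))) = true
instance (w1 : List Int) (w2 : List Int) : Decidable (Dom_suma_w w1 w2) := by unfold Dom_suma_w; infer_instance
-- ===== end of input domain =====

-- B replaces A's single padded loop (per-index bounds checks into a preallocated
-- zero list) by an element-wise zip over the common prefix followed by appending
-- the longer vector's tail; objective: idiomatic.

-- ===== PORT A =====
-- wynik = [0]*n; for i in range(n): if i < len(w1): wynik[i] += w1[i]; if i < len(w2): wynik[i] += w2[i]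
def suma_w (w1 : List Int) (w2 : List Int) : List Int :=
  let n : Nat := max w1.length w2.length
  (List.range n).foldl
    (fun wynik i =>
      let wynik := if i < w1.length then wynik.set i (wynik.getD i 0 + w1.getD i 0) else wynik
      if i < w2.length then wynik.set i (wynik.getD i 0 + w2.getD i 0) else wynik)
    (List.replicate n 0)

-- ===== PORT B =====
-- m = min(len(w1), len(w2)); res = [a + b for a, b in zip(w1, w2)];
-- res += w1[m:] if len(w1) > len(w2) else w2[m:]
-- (the slice v[m:] with 0 ≤ m is exactly List.drop m)
def suma_w_alt (w1 : List Int) (w2 : List Int) : List Int :=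
  let m : Nat := min w1.length w2.length
  let res := (w1.zip w2).map (fun p => p.1 + p.2)
  res ++ (if w1.length > w2.length then w1.drop m else w2.drop m)

-- ===== PRECONDITION & SPEC =====
def Spec_suma_w (w1 : List Int) (w2 : List Int) (out : List Int) : Prop := out = suma_w_alt w1 w2
instance (w1 : List Int) (w2 : List Int) (out : List Int) : Decidable (Spec_suma_w w1 w2 out) := by unfold Spec_suma_w; infer_instance

-- ===== CLAIM (what is proved, stated in full; the proofs are below) =====
def Claim_equal_suma_w : Prop := ∀ (w1 : List Int) (w2 : List Int), Dom_suma_w w1 w2 → Spec_suma_w w1 w2 (suma_w w1 w2)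

-- ===== LEMMAS AND PROOFS =====

-- closed form both ports are reduced to
def pvSumAt (w1 w2 : List Int) (j : Nat) : Int := w1.getD j 0 + w2.getD j 0

lemma suma_w_invariant (w1 w2 : List Int) (n k : Nat) (hn : n = max w1.length w2.length)
    (hk : k ≤ n) :
    (List.range k).foldl
      (fun wynik i =>
        let wynik := if i < w1.length then wynik.set i (wynik.getD i 0 + w1.getD i 0) else wynik
        if i < w2.length then wynik.set i (wynik.getD i 0 + w2.getD i 0) else wynik)
      (List.replicate n 0)
    = (List.range k).map (pvSumAt w1 w2) ++ List.replicate (n - k) 0 := by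
  induction k with
  | zero => simp
  | succ k ih =>
    have hk' : k ≤ n := Nat.le_of_succ_le hk
    rw [List.range_succ, List.foldl_append, ih hk']
    have hkn : k < n := hk
    have hlen : ((List.range k).map (pvSumAt w1 w2)).length = k := by simp
    have hrep : n - k = (n - (k + 1)) + 1 := by omega
    set P := (List.range k).map (pvSumAt w1 w2) with hP
    have hsplit : P ++ List.replicate (n - k) 0 = P ++ 0 :: List.replicate (n - (k + 1)) (0 : Int) := by
      rw [hrep, List.replicate_succ]
    rw [hsplit]
    have hgetD : ∀ v : Int, (P ++ v :: List.replicate (n - (k + 1)) (0 : Int)).getD k 0 = v := by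
      intro v
      rw [List.getD_eq_getElem _ _ (by simp only [List.length_append, List.length_cons, hlen]; omega)]
      rw [List.getElem_append_right (by omega)]
      simp [hlen]
    have hset : ∀ v w : Int, (P ++ v :: List.replicate (n - (k + 1)) (0 : Int)).set k w
        = P ++ w :: List.replicate (n - (k + 1)) (0 : Int) := by
      intro v w
      rw [List.set_append_right _ _ (by omega), hlen]
      simp
    simp only [List.foldl_cons, List.foldl_nil]
    have hmap : (List.range k ++ [k]).map (pvSumAt w1 w2) ++ List.replicate (n - (k + 1)) (0 : Int)
        = P ++ pvSumAt w1 w2 k :: List.replicate (n - (k + 1)) 0 := by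
      rw [List.map_append]
      simp [hP]
    rw [hmap]
    by_cases h1 : k < w1.length <;> by_cases h2 : k < w2.length <;>
      simp only [h1, h2, if_true, if_false, hgetD, hset]
    · congr 2; simp only [pvSumAt]; ring
    · congr 2; simp only [pvSumAt]
      rw [List.getD_eq_default w2 _ (by omega)]; ring
    · congr 2; simp only [pvSumAt]
      rw [List.getD_eq_default w1 _ (by omega)]
    · omega

lemma suma_w_closed (w1 w2 : List Int) :
    suma_w w1 w2 = (List.range (max w1.length w2.length)).map (pvSumAt w1 w2) := by
  unfold suma_w
  rw [suma_w_invariant w1 w2 _ _ rfl (le_refl _)]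
  simp

lemma suma_w_alt_closed (w1 w2 : List Int) :
    suma_w_alt w1 w2 = (List.range (max w1.length w2.length)).map (pvSumAt w1 w2) := by
  unfold suma_w_alt
  apply List.ext_getElem
  · by_cases hg : w1.length > w2.length <;> simp [hg] <;> omega
  · intro j h1 h2
    have h2' : j < max w1.length w2.length := by simpa using h2
    simp only [List.getElem_map, List.getElem_range, pvSumAt]
    by_cases hj : j < min w1.length w2.length
    · rw [List.getElem_append_left (by simp; omega)]
      simp only [List.getElem_map, List.getElem_zip]
      rw [List.getD_eq_getElem w1 _ (by omega), List.getD_eq_getElem w2 _ (by omega)]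
    · rw [List.getElem_append_right (by simp; omega)]
      by_cases hg : w1.length > w2.length <;> simp only [hg, if_true, if_false,
        List.length_map, List.length_zip, List.getElem_drop]
      · rw [List.getD_eq_default w2 _ (by omega), List.getD_eq_getElem w1 _ (by omega)]
        have hidx : min w1.length w2.length + (j - min w1.length w2.length) = j := by omega
        simp [hidx]
      · rw [List.getD_eq_default w1 _ (by omega), List.getD_eq_getElem w2 _ (by omega)]
        have hidx : min w1.length w2.length + (j - min w1.length w2.length) = j := by omega
        simp [hidx]

-- ===== VERDICT (by name: the statement is the Claim_ definition above) =====
theorem suma_w_spec : Claim_equal_suma_w := by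
  intro w1 w2 _
  unfold Spec_suma_w
  rw [suma_w_closed, suma_w_alt_closed]
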